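-- pv_equiv track=rewrite | github.com/pencil-code/pencil-code | doc/readthedocs/_ext/fortran_autodoc.py | get_synopsis
-- ===== SOURCE A (Python) =====
-- def get_synopsis(block, nmax=2):
--     """Get the first ``nmax`` non empty lines of the function, type or module comment as 1 line.
--
--     If the header has more than ``nmax`` lines, the first one is taken and appended of '...'.
--     If description if empty, it returns an empty string.
--     """
--     sd = []
--     for line in block['desc']:
--         line = line.strip()
--         if not line:
--             if not sd:
--                 continue
--             break
--         sd.append(line)
--         if len(sd) > nmax:
--             if sd[-1].endswith('.'):
--                 sd[-1] += '...'
--             break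
--     if not sd:
--         return ''
--     sd = ' '.join(sd)
--     return sd
-- ===== SOURCE B (Python) =====
-- from itertools import dropwhile, takewhile
--
-- def get_synopsis(block, nmax=2):
--     stripped = (line.strip() for line in block['desc'])
--     seg = list(takewhile(bool, dropwhile(lambda s: not s, stripped)))
--     k = max(nmax + 1, 1)
--     kept = seg[:k]
--     if not kept:
--         return ''
--     if len(seg) >= k and kept[-1].endswith('.'):
--         kept[-1] += '...'
--     return ' '.join(kept)
-- ===== Notes on version B (the rewrite author's own statement) =====
-- stated objective: alternative
-- what changed: A's single stateful loop with break/continue and an accumulator is replaced by a dropwhile/takewhile pipeline: skip leading blank lines, take the first contiguous non-blank run, truncate it to max(nmax+1,1) lines, then apply the ellipsis rule once at the end.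
-- outside the precondition, e.g. on get_synopsis({}, 2): A raises KeyError, B raises KeyError
import Mathlib
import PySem

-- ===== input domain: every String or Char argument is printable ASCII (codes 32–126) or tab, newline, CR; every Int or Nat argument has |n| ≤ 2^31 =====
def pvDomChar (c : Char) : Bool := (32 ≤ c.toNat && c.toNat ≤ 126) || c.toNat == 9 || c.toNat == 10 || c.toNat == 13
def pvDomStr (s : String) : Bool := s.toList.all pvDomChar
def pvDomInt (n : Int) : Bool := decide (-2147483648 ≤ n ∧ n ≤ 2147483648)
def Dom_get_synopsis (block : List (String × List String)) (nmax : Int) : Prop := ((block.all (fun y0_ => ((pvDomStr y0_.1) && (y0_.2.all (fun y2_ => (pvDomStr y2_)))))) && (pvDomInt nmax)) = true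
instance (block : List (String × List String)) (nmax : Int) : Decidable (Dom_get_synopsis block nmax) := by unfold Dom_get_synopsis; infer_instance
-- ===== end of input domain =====

-- B replaces A's single stateful break-driven loop by a skip/take/truncate pipeline (same cost); equal return values proved on Pre_ (the key 'desc' present; otherwise Python raises KeyError).

-- ===== PORT A =====
-- block['desc'] : first-match lookup in the association list (none = KeyError, excluded by Pre_)
def pyLookupDesc : List (String × List String) → Option (List String)
  | [] => none
  | (key, v) :: rest => if key == "desc" then some v else pyLookupDesc rest

-- A's for-loop over block['desc'] with accumulator sd; `break` = returning the final sd
def getSynLoop : List String → List String → Int → List String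
  | [], sd, _ => sd
  | l :: rest, sd, nmax =>
    let line := PySem.Str.strip l
    if line == "" then
      (if sd.isEmpty then getSynLoop rest sd nmax else sd)
    else
      let sd' := sd ++ [line]
      if nmax < (sd'.length : Int) then
        (if PySem.Str.endswith line "." then sd'.dropLast ++ [line ++ "..."] else sd')
      else getSynLoop rest sd' nmax

def get_synopsis (block : List (String × List String)) (nmax : Int) : String :=
  match pyLookupDesc block with
  | none => ""   -- Python raises KeyError here; excluded by Pre_
  | some desc =>
    let sd := getSynLoop desc [] nmax
    if sd.isEmpty then "" else PySem.Str.join " " sd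

-- ===== PORT B =====
def get_synopsis_alt (block : List (String × List String)) (nmax : Int) : String :=
  match pyLookupDesc block with
  | none => ""   -- Python raises KeyError here; excluded by Pre_
  | some desc =>
    let seg := ((desc.map PySem.Str.strip).dropWhile (· == "")).takeWhile (· != "")
    let k : Int := max (nmax + 1) 1
    let kept := seg.take k.toNat
    if kept.isEmpty then ""
    else
      let last := kept.getLast!
      let kept' := if k ≤ (seg.length : Int) ∧ PySem.Str.endswith last "." = true
                   then kept.dropLast ++ [last ++ "..."] else kept
      PySem.Str.join " " kept'

-- ===== PRECONDITION & SPEC =====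
-- Pre_ excludes exactly the inputs where block has no key 'desc': there Python A raises KeyError.
def Pre_get_synopsis (block : List (String × List String)) (nmax : Int) : Prop :=
  block.any (fun p => p.1 == "desc") = true
instance (block : List (String × List String)) (nmax : Int) : Decidable (Pre_get_synopsis block nmax) := by unfold Pre_get_synopsis; infer_instance

def pvWitness_get_synopsis : (List (String × List String)) × Int := ([("desc", ["hello."])], 2)

def Spec_get_synopsis (block : List (String × List String)) (nmax : Int) (out : String) : Prop := out = get_synopsis_alt block nmax
instance (block : List (String × List String)) (nmax : Int) (out : String) : Decidable (Spec_get_synopsis block nmax out) := by unfold Spec_get_synopsis; infer_instance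

-- ===== CLAIM (what is proved, stated in full; the proofs are below) =====
def Claim_equal_get_synopsis : Prop := ∀ (block : List (String × List String)) (nmax : Int), Dom_get_synopsis block nmax → Pre_get_synopsis block nmax → Spec_get_synopsis block nmax (get_synopsis block nmax)

-- ===== LEMMAS AND PROOFS =====

-- the stripped lines of the first contiguous non-blank run
def segOf (lines : List String) : List String :=
  (lines.map PySem.Str.strip).takeWhile (· != "")

-- sd (already collected) plus up to `cap` further lines of seg, with A's ellipsis rule when the cap is reached
def finish (sd seg : List String) (cap : Nat) : List String :=
  let all := sd ++ seg.take cap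
  if cap ≤ seg.length ∧ PySem.Str.endswith all.getLast! "." = true
  then all.dropLast ++ [all.getLast! ++ "..."] else all

-- B's some-branch as a list, for the induction
def altList (lines : List String) (nmax : Int) : List String :=
  let seg := ((lines.map PySem.Str.strip).dropWhile (· == "")).takeWhile (· != "")
  let k : Int := max (nmax + 1) 1
  let kept := seg.take k.toNat
  if kept.isEmpty then []
  else
    if k ≤ (seg.length : Int) ∧ PySem.Str.endswith kept.getLast! "." = true
    then kept.dropLast ++ [kept.getLast! ++ "..."] else kept

lemma hlen_aux (sd : List String) (x : String) : ((sd ++ [x]).length : Int) = (sd.length : Int) + 1 := by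
  simp

lemma finish_cons (sd : List String) (x : String) (segR : List String) (capR : Nat) :
    finish (sd ++ [x]) segR capR = finish sd (x :: segR) (capR + 1) := by
  simp only [finish, List.take_succ_cons, List.length_cons]
  have hall : (sd ++ [x]) ++ segR.take capR = sd ++ x :: segR.take capR := by simp
  rw [hall]
  have hc : (capR ≤ segR.length) ↔ (capR + 1 ≤ segR.length + 1) := by omega
  split_ifs with h1 h2 h2
  · rfl
  · exact absurd ⟨hc.mp h1.1, h1.2⟩ h2
  · exact absurd ⟨hc.mpr h2.1, h2.2⟩ h1
  · rfl

lemma core (lines : List String) : ∀ (sd : List String) (nmax : Int),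
    sd ≠ [] → (sd.length : Int) ≤ nmax →
    getSynLoop lines sd nmax = finish sd (segOf lines) (nmax + 1 - sd.length).toNat := by
  induction lines with
  | nil =>
    intro sd nmax hne hle
    simp only [getSynLoop, segOf, List.map_nil, List.takeWhile_nil, finish, List.take_nil,
      List.append_nil, List.length_nil]
    rw [if_neg]
    intro h
    omega
  | cons l rest ih =>
    intro sd nmax hne hle
    by_cases hs : PySem.Str.strip l = ""
    · simp only [getSynLoop, hs, beq_self_eq_true, if_pos, List.isEmpty_iff, hne]
      simp only [segOf, List.map_cons, List.takeWhile_cons, hs, bne_self_eq_false,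
        Bool.false_eq_true, ite_false, finish, List.take_nil, List.append_nil, List.length_nil]
      rw [if_neg]
      intro h
      omega
    · have hb : (PySem.Str.strip l == "") = false := by simpa using hs
      have hseg : segOf (l :: rest) = PySem.Str.strip l :: segOf rest := by
        simp [segOf, hs]
      simp only [getSynLoop, hb, Bool.false_eq_true, ite_false]
      by_cases hcap : nmax < ((sd ++ [PySem.Str.strip l]).length : Int)
      · -- cap reached: exactly one more line is taken and the loop breaks
        have hlen1 : (sd ++ [PySem.Str.strip l]).length = sd.length + 1 := by simp
        have hc1 : (nmax + 1 - (sd.length : Int)).toNat = 1 := by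
          rw [hlen1] at hcap
          push_cast at hcap
          omega
        rw [if_pos hcap, hseg, hc1]
        simp only [finish, List.take_succ_cons, List.take_zero, List.length_cons]
        have hlast : (sd ++ [PySem.Str.strip l]).getLast! = PySem.Str.strip l := by simp
        rw [hlast]
        have hone : 1 ≤ (segOf rest).length + 1 := by omega
        split_ifs with h1 h2 h2
        · rfl
        · exact absurd ⟨hone, h1⟩ h2
        · exact absurd h2.2 h1
        · rfl
      · rw [if_neg hcap]
        rw [hlen_aux sd (PySem.Str.strip l)] at hcap
        have hle' : ((sd ++ [PySem.Str.strip l]).length : Int) ≤ nmax := by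
          rw [hlen_aux]; omega
        rw [ih (sd ++ [PySem.Str.strip l]) nmax (by simp) hle']
        rw [finish_cons, hseg]
        congr 1
        rw [hlen_aux]
        omega

lemma alt_eq_finish (lines : List String) (nmax : Int) :
    altList lines nmax =
      finish [] (((lines.map PySem.Str.strip).dropWhile (· == "")).takeWhile (· != ""))
        (max (nmax + 1) 1).toNat := by
  cases hseg : ((lines.map PySem.Str.strip).dropWhile (· == "")).takeWhile (· != "") with
  | nil =>
    simp only [altList, hseg, finish, List.take_nil, List.isEmpty_nil, ite_true,
      List.append_nil, List.length_nil]
    rw [eq_comm, if_neg]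
    intro h
    omega
  | cons x s =>
    obtain ⟨m, hm⟩ : ∃ m, (max (nmax + 1) 1).toNat = m + 1 := ⟨(max (nmax + 1) 1).toNat - 1, by omega⟩
    simp only [altList, hseg, finish, hm, List.take_succ_cons, List.nil_append, List.length_cons]
    rw [if_neg (by simp)]
    have hiff : (max (nmax + 1) 1 ≤ ((x :: s).length : Int)) ↔ (m + 1 ≤ s.length + 1) := by
      simp only [List.length_cons]
      omega
    split_ifs with ha hf hf
    · rfl
    · exact absurd ⟨hiff.mp ha.1, ha.2⟩ hf
    · exact absurd ⟨hiff.mpr hf.1, hf.2⟩ ha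
    · rfl

lemma entry (lines : List String) (nmax : Int) :
    getSynLoop lines [] nmax = altList lines nmax := by
  rw [alt_eq_finish]
  induction lines with
  | nil =>
    simp only [getSynLoop, List.map_nil, List.dropWhile_nil, List.takeWhile_nil, finish,
      List.take_nil, List.append_nil, List.length_nil]
    rw [if_neg]
    intro h
    omega
  | cons l rest ih =>
    by_cases hs : PySem.Str.strip l = ""
    · have hstep : getSynLoop (l :: rest) [] nmax = getSynLoop rest [] nmax := by
        simp [getSynLoop, hs]
      rw [hstep, ih]
      simp [hs]
    · have hb : (PySem.Str.strip l == "") = false := by simpa using hs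
      have hseg' : (((l :: rest).map PySem.Str.strip).dropWhile (· == "")).takeWhile (· != "")
          = PySem.Str.strip l :: segOf rest := by
        simp [segOf, hb, hs]
      rw [hseg']
      by_cases h1 : nmax < 1
      · -- the very first kept line already reaches the cap and the loop breaks
        have hk1 : (max (nmax + 1) 1).toNat = 1 := by omega
        have hlt : nmax < ((([] : List String) ++ [PySem.Str.strip l]).length : Int) := by
          simp
          omega
        simp only [getSynLoop, hb, Bool.false_eq_true, ite_false]
        rw [if_pos hlt, hk1]
        simp only [finish, List.take_succ_cons, List.take_zero, List.nil_append, List.length_cons]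
        have hlast : ([PySem.Str.strip l] : List String).getLast! = PySem.Str.strip l := by simp
        rw [hlast]
        have hone : 1 ≤ (segOf rest).length + 1 := by omega
        split_ifs with hA hF hF
        · simp
        · exact absurd ⟨hone, by simpa using hA⟩ hF
        · exact absurd (by simpa using hF.2) hA
        · simp
      · -- nmax ≥ 1: the loop continues with sd = [strip l]
        have hlt : ¬ nmax < ((([] : List String) ++ [PySem.Str.strip l]).length : Int) := by
          simp
          omega
        simp only [getSynLoop, hb, Bool.false_eq_true, ite_false]
        rw [if_neg hlt]
        have hne : ([PySem.Str.strip l] : List String) ≠ [] := by simp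
        have hle : ((([PySem.Str.strip l] : List String)).length : Int) ≤ nmax := by
          simp
          omega
        rw [List.nil_append, core rest [PySem.Str.strip l] nmax hne hle]
        have hcap : (nmax + 1 - ((([PySem.Str.strip l] : List String)).length : Int)).toNat
            = nmax.toNat := by
          rw [show (([PySem.Str.strip l] : List String)).length = 1 from rfl]
          omega
        rw [hcap]
        have hfc := finish_cons [] (PySem.Str.strip l) (segOf rest) nmax.toNat
        simp only [List.nil_append] at hfc
        rw [hfc]
        have : nmax.toNat + 1 = (max (nmax + 1) 1).toNat := by omega
        rw [this]

-- bridge from the list-level equality to the two string results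
lemma some_branch (desc : List String) (nmax : Int) :
    (if (getSynLoop desc [] nmax).isEmpty then "" else PySem.Str.join " " (getSynLoop desc [] nmax)) =
    (let seg := ((desc.map PySem.Str.strip).dropWhile (· == "")).takeWhile (· != "")
     let k : Int := max (nmax + 1) 1
     let kept := seg.take k.toNat
     if kept.isEmpty then ""
     else
       let last := kept.getLast!
       let kept' := if k ≤ (seg.length : Int) ∧ PySem.Str.endswith last "." = true
                    then kept.dropLast ++ [last ++ "..."] else kept
       PySem.Str.join " " kept') := by
  rw [entry]
  simp only [altList]
  set seg := ((desc.map PySem.Str.strip).dropWhile (· == "")).takeWhile (· != "") with hsegdef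
  set kept := seg.take (max (nmax + 1) 1).toNat with hkeptdef
  by_cases hk : kept.isEmpty = true
  · simp [hk]
  · by_cases hc : max (nmax + 1) 1 ≤ (seg.length : Int) ∧
        PySem.Str.endswith kept.getLast! "." = true
    · rw [if_pos hc]
      simp [hk]
    · rw [if_neg hc]
      simp [hk]

lemma lookup_isSome_of_pre (block : List (String × List String)) (hp : block.any (fun p => p.1 == "desc") = true) :
    pyLookupDesc block ≠ none := by
  induction block with
  | nil => simp at hp
  | cons q rest ih =>
    obtain ⟨key, v⟩ := q
    by_cases hq : (key == "desc") = true
    · simp [pyLookupDesc, hq]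
    · simp only [List.any_cons, Bool.or_eq_true] at hp
      rcases hp with hp | hp
      · exact absurd hp hq
      · simpa [pyLookupDesc, hq] using ih hp

-- ===== VERDICT (by name: the statement is the Claim_ definition above) =====
theorem get_synopsis_spec : Claim_equal_get_synopsis := by
  intro block nmax _ hpre
  unfold Spec_get_synopsis get_synopsis get_synopsis_alt
  cases h : pyLookupDesc block with
  | none => exact absurd h (lookup_isSome_of_pre block hpre)
  | some desc => exact some_branch desc nmax
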